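-- pv_equiv track=rewrite | github.com/tathiyennhi/automatic-citation-checking | label_task3_logic.py | _skip_ws_and_tags_right
-- ===== SOURCE A (Python) =====
-- def _skip_ws_and_tags_right(text: str, pos: int) -> int:
--     while pos < len(text):
--         if text[pos] in " \t\n":
--             pos += 1
--             continue
--         if text.startswith("[CITATION_", pos):
--             end = text.find("]", pos)
--             if end != -1:
--                 pos = end + 1
--                 continue
--         break
--     return pos
-- ===== SOURCE B (Python) =====
-- import re
--
-- # One anchored regex consumes whitespace and complete [CITATION_...] tags in a
-- # single match instead of a manual per-character loop with find().
-- _pat = re.compile(r"(?:[ \t\n]|\[CITATION_[^\]]*\])*")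
--
--
-- def _skip_ws_and_tags_right(text: str, pos: int) -> int:
--     if pos >= len(text):
--         return pos
--     return _pat.match(text, pos).end()
-- ===== Notes on version B (the rewrite author's own statement) =====
-- stated objective: idiomatic
-- what changed: The hand-written while-loop with per-character branching and find() is replaced by a single precompiled anchored regex (?:[ \t\n]|\[CITATION_[^\]]*\])* whose match end is returned; Pre_ restricts pos to valid string positions 0 <= pos, since for negative pos A's value comes from Python's negative-index wraparound while the regex clamps.
-- outside the precondition, e.g. on _skip_ws_and_tags_right('ab', -1): A returns -1, B returns 0; on _skip_ws_and_tags_right('a', -5): A raises IndexError, B returns 0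
import Mathlib
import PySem

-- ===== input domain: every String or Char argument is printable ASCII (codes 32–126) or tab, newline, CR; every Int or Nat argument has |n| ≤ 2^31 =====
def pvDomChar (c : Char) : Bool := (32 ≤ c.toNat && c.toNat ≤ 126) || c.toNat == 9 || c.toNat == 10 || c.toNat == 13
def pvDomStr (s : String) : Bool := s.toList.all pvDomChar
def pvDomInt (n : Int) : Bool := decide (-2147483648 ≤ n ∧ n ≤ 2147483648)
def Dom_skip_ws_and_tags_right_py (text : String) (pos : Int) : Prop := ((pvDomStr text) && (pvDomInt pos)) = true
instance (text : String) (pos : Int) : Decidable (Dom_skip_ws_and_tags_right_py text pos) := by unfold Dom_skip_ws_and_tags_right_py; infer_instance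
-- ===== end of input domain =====

-- B replaces A's hand-written scanning loop by one precompiled anchored regex whose
-- match end is returned (idiomatic; same O(n) cost). Equality of RETURN values on
-- string positions 0 ≤ pos.

-- ===== PORT A =====
-- the while-loop, with the loop variable `pos`; fuel bounds the iteration count
-- (pos strictly increases each iteration while pos < len, so the fuel never runs out).
-- `text[pos] in " \t\n"` is PySem.Chars.isIn of the one-char string;
-- `text.startswith("[CITATION_", pos)` reads its start argument as a clamped slice
-- bound (PySem.List.clampIdx), exactly CPython's rule; `text.find("]", pos)` is
-- PySem.Chars.findFrom.  On pyGet? = none Python raises IndexError (outside Pre_).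
def skipGoA (cs : List Char) : Nat → Int → Int
  | 0, pos => pos
  | fuel + 1, pos =>
    if pos < (cs.length : Int) then
      match PySem.List.pyGet? cs pos with
      | none => pos
      | some c =>
        if PySem.Chars.isIn [c] (" \t\n".toList) then skipGoA cs fuel (pos + 1)
        else if PySem.Chars.startswith (cs.drop (PySem.List.clampIdx cs.length pos)) ("[CITATION_".toList) then
          let e := PySem.Chars.findFrom cs [']'] pos
          if e ≠ -1 then skipGoA cs fuel (e + 1) else pos
        else pos
    else pos

def skip_ws_and_tags_right_py (text : String) (pos : Int) : Int :=
  skipGoA text.toList (((text.toList.length : Int) - pos).toNat + 1) pos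

-- ===== PORT B =====
-- Hand port of Source B's precompiled regex (?:[ \t\n]|\[CITATION_[^\]]*\])* matched
-- anchored at a position: each star iteration consumes one of ' ','\t','\n' or a
-- complete '[CITATION_' … ']' tag ([^\]]* is the run of non-']' characters and the
-- closing ']' is mandatory, so a tag without ']' fails the alternative and the
-- greedy star stops); pvRegexLen is the length of that maximal match.  Exact.
def pvRegexGo : Nat → List Char → Nat
  | 0, _ => 0
  | _ + 1, [] => 0
  | fuel + 1, c :: rest =>
    if c = ' ' ∨ c = '\t' ∨ c = '\n' then 1 + pvRegexGo fuel rest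
    else if PySem.Chars.startswith (c :: rest) ("[CITATION_".toList) then
      let run := (c :: rest).takeWhile (fun d => d ≠ ']')
      if run.length < (c :: rest).length then
        run.length + 1 + pvRegexGo fuel ((c :: rest).drop (run.length + 1))
      else 0
    else 0

def pvRegexLen (s : List Char) : Nat := pvRegexGo s.length s

-- re.match(text, pos) clamps a negative pos to 0 (Int.toNat); .end() = start + match length
def skip_ws_and_tags_right_py_alt (text : String) (pos : Int) : Int :=
  if pos ≥ (text.toList.length : Int) then pos
  else
    let s := pos.toNat
    (s : Int) + (pvRegexLen (text.toList.drop s) : Int)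

-- ===== PRECONDITION & SPEC =====
-- Pre_ restricts pos to valid scan positions 0 ≤ pos: a NEGATIVE pos is read by A
-- through Python's negative-index wraparound (and raises IndexError for pos < -len),
-- an accident of indexing that the regex's clamped start does not reproduce.
def Pre_skip_ws_and_tags_right_py (text : String) (pos : Int) : Prop := 0 ≤ pos
instance (text : String) (pos : Int) : Decidable (Pre_skip_ws_and_tags_right_py text pos) := by unfold Pre_skip_ws_and_tags_right_py; infer_instance

def pvWitness_skip_ws_and_tags_right_py : String × Int := ("  [CITATION_1] x", 0)

def Spec_skip_ws_and_tags_right_py (text : String) (pos : Int) (out : Int) : Prop := out = skip_ws_and_tags_right_py_alt text pos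
instance (text : String) (pos : Int) (out : Int) : Decidable (Spec_skip_ws_and_tags_right_py text pos out) := by unfold Spec_skip_ws_and_tags_right_py; infer_instance

-- ===== CLAIM (what is proved, stated in full; the proofs are below) =====
def Claim_equal_skip_ws_and_tags_right_py : Prop := ∀ (text : String) (pos : Int), Dom_skip_ws_and_tags_right_py text pos → Pre_skip_ws_and_tags_right_py text pos → Spec_skip_ws_and_tags_right_py text pos (skip_ws_and_tags_right_py text pos)

-- ===== LEMMAS AND PROOFS =====

-- takeWhile facts, by induction on the list
lemma pv_tw_mem {P : Char → Bool} : ∀ (s : List Char) (i : Nat) (h : i < (s.takeWhile P).length) (h2 : i < s.length), P (s[i]'h2) = true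
  | c :: t, i, h, h2 => by
    by_cases hc : P c
    · cases i with
      | zero => simpa using hc
      | succ j =>
        simp only [List.takeWhile_cons, hc, if_true, List.length_cons, Nat.add_lt_add_iff_right] at h
        simpa using pv_tw_mem t j h (by simpa using Nat.lt_of_lt_of_le h (List.Sublist.length_le (List.takeWhile_sublist P)))
    · simp [List.takeWhile_cons, hc] at h

lemma pv_tw_stop {P : Char → Bool} : ∀ (s : List Char) (h : (s.takeWhile P).length < s.length), P (s[(s.takeWhile P).length]'h) = false
  | c :: t, h => by
    by_cases hc : P c
    · simp only [List.takeWhile_cons, hc, if_true, List.length_cons] at h ⊢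
      simpa using pv_tw_stop t (by omega)
    · simpa [List.takeWhile_cons, hc] using hc

lemma pv_tw_lt (s : List Char) (a : Char) (h : a ∈ s) : (s.takeWhile (fun d => d ≠ a)).length < s.length := by
  by_contra hle
  push_neg at hle
  have hlen : (s.takeWhile (fun d => d ≠ a)).length = s.length :=
    Nat.le_antisymm (List.Sublist.length_le (List.takeWhile_sublist _)) hle
  obtain ⟨i, hi, hgi⟩ := List.mem_iff_getElem.mp h
  have := pv_tw_mem (P := fun d => d ≠ a) s i (by omega) hi
  simp [hgi] at this

-- pvRegexGo is fuel-irrelevant once the fuel covers the length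
lemma pv_singleton_prefix (a : Char) (l : List Char) : [a] <+: l ↔ l.head? = some a := by
  cases l with
  | nil => simp
  | cons b t => simp [List.cons_prefix_cons, eq_comm]

lemma pv_go_congr : ∀ (f1 : Nat) (s : List Char) (f2 : Nat), s.length ≤ f1 → s.length ≤ f2 → pvRegexGo f1 s = pvRegexGo f2 s
  | 0, s, f2, h1, _ => by
    have hs : s = [] := List.length_eq_zero_iff.mp (Nat.le_zero.mp h1)
    subst hs; cases f2 <;> simp [pvRegexGo]
  | _ + 1, [], f2, _, _ => by cases f2 <;> simp [pvRegexGo]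
  | f1 + 1, c :: rest, f2, h1, h2 => by
    cases f2 with
    | zero => simp at h2
    | succ f2' =>
      simp only [pvRegexGo]
      split_ifs with hws htag hrun
      · have := pv_go_congr f1 rest f2' (by simpa using Nat.lt_succ_iff.mp (by simpa using h1))
          (by simpa using Nat.lt_succ_iff.mp (by simpa using h2))
        omega
      · have hd : ((c :: rest).drop (((c :: rest).takeWhile (fun d => d ≠ ']')).length + 1)).length ≤ rest.length := by
          simp only [List.length_drop, List.length_cons]; omega
        have := pv_go_congr f1 ((c :: rest).drop (((c :: rest).takeWhile (fun d => d ≠ ']')).length + 1)) f2'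
          (by simp only [List.length_cons] at h1; omega) (by simp only [List.length_cons] at h2; omega)
        omega
      · rfl
      · rfl

-- one unfolding step of the regex match length on a nonempty suffix
lemma pv_regex_cons (c : Char) (rest : List Char) :
    pvRegexLen (c :: rest) =
      if c = ' ' ∨ c = '\t' ∨ c = '\n' then 1 + pvRegexLen rest
      else if PySem.Chars.startswith (c :: rest) ("[CITATION_".toList) then
        (if ((c :: rest).takeWhile (fun d => d ≠ ']')).length < (c :: rest).length then
          ((c :: rest).takeWhile (fun d => d ≠ ']')).length + 1 +
            pvRegexLen ((c :: rest).drop (((c :: rest).takeWhile (fun d => d ≠ ']')).length + 1))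
        else 0)
      else 0 := by
  have step : pvRegexLen (c :: rest) = pvRegexGo (rest.length + 1) (c :: rest) := by
    simp [pvRegexLen]
  rw [step]
  simp only [pvRegexGo]
  split_ifs with hws htag hrun
  · rfl
  · have hd : ((c :: rest).drop (((c :: rest).takeWhile (fun d => d ≠ ']')).length + 1)).length ≤ rest.length := by
      simp only [List.length_drop, List.length_cons]; omega
    unfold pvRegexLen
    rw [pv_go_congr rest.length _ _ hd (le_refl _)]
  · rfl
  · rfl

-- find of a one-character needle = length of the non-matching prefix
lemma pv_find_singleton (s : List Char) (a : Char) :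
    PySem.Chars.find s [a] = if a ∈ s then (((s.takeWhile (fun d => d ≠ a)).length : Int)) else -1 := by
  by_cases hmem : a ∈ s
  · have hinf : [a] <:+: s := (List.singleton_infix_iff a s).mpr hmem
    have hnn : 0 ≤ PySem.Chars.find s [a] := (PySem.Chars.find_nonneg_iff s [a]).mpr hinf
    obtain ⟨hpre, hmin⟩ := PySem.Chars.find_spec hnn
    have hfa : (s.drop (PySem.Chars.find s [a]).toNat).head? = some a := (pv_singleton_prefix _ _).mp hpre
    have hflt : (PySem.Chars.find s [a]).toNat < s.length := by
      by_contra hge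
      rw [List.drop_eq_nil_of_le (by omega)] at hfa
      simp at hfa
    have hgf : s[(PySem.Chars.find s [a]).toNat] = a := by
      rw [List.head?_drop] at hfa
      simpa [List.getElem?_eq_getElem hflt] using hfa
    have htlt : (s.takeWhile (fun d => d ≠ a)).length < s.length := pv_tw_lt s a hmem
    have hta : s[(s.takeWhile (fun d => d ≠ a)).length] = a := by
      have := pv_tw_stop (P := fun d => d ≠ a) s htlt
      simpa using this
    -- t ≤ f: every index below t carries a character ≠ a
    have h1 : (s.takeWhile (fun d => d ≠ a)).length ≤ (PySem.Chars.find s [a]).toNat := by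
      by_contra hlt
      have := pv_tw_mem (P := fun d => d ≠ a) s (PySem.Chars.find s [a]).toNat (by omega) hflt
      simp [hgf] at this
    -- f ≤ t: find is minimal
    have h2 : (PySem.Chars.find s [a]).toNat ≤ (s.takeWhile (fun d => d ≠ a)).length := by
      by_contra hlt
      exact hmin (s.takeWhile (fun d => d ≠ a)).length (by omega) ((pv_singleton_prefix _ _).mpr (by rw [List.head?_drop, List.getElem?_eq_getElem htlt, hta]))
    simp only [hmem, if_true]
    have h3 := Int.toNat_of_nonneg hnn
    omega
  · simp only [hmem, if_false]
    exact (PySem.Chars.find_eq_neg_one_iff s [a]).mpr (fun h => hmem ((List.singleton_infix_iff a s).mp h))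

-- the whitespace tests of the two ports agree
lemma pv_ws_iff (c : Char) : PySem.Chars.isIn [c] (" \t\n".toList) = true ↔ (c = ' ' ∨ c = '\t' ∨ c = '\n') := by
  rw [PySem.Chars.isIn_iff_infix, List.singleton_infix_iff]
  have h : (" \t\n".toList) = [' ', '\t', '\n'] := by decide
  rw [h]; simp

-- the loop of A computes position + maximal regex match length
lemma pv_goA_eq (cs : List Char) : ∀ (fuel p : Nat), cs.length - p < fuel →
    skipGoA cs fuel (p : Int) = (p : Int) + (pvRegexLen (cs.drop p) : Int)
  | fuel + 1, p, h => by
    by_cases hp : p < cs.length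
    case neg =>
      have hdrop : cs.drop p = [] := List.drop_eq_nil_of_le (by omega)
      have hcond : ¬ ((p : Int) < (cs.length : Int)) := by exact_mod_cast hp
      simp [skipGoA, hcond, hdrop, pvRegexLen, pvRegexGo]
    case pos =>
      have hcond : (p : Int) < (cs.length : Int) := by exact_mod_cast hp
      have hget : PySem.List.pyGet? cs (p : Int) = some (cs[p]'hp) := by
        rw [PySem.List.pyGet?_natCast]; simp [List.getElem?_eq_getElem hp]
      have hdrop : cs.drop p = cs[p] :: cs.drop (p + 1) := List.drop_eq_getElem_cons hp
      have hclamp : PySem.List.clampIdx cs.length ((p : Nat) : Int) = p := by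
        rw [PySem.List.clampIdx_natCast]; omega
      simp only [skipGoA, hcond, if_true, hget, hclamp]
      by_cases hws : PySem.Chars.isIn [cs[p]'hp] (" \t\n".toList) = true
      · -- whitespace step
        have hwsP : (cs[p]'hp) = ' ' ∨ (cs[p]'hp) = '\t' ∨ (cs[p]'hp) = '\n' := (pv_ws_iff _).mp hws
        rw [if_pos hws]
        have hstep : ((p : Int) + 1) = (((p + 1 : Nat) : Int)) := by push_cast; ring
        rw [hstep, pv_goA_eq cs fuel (p + 1) (by omega)]
        rw [hdrop, pv_regex_cons, if_pos hwsP]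
        push_cast; ring
      · rw [if_neg hws]
        have hwsP : ¬ ((cs[p]'hp) = ' ' ∨ (cs[p]'hp) = '\t' ∨ (cs[p]'hp) = '\n') := fun hc => hws ((pv_ws_iff _).mpr hc)
        by_cases htag : PySem.Chars.startswith (cs.drop p) ("[CITATION_".toList) = true
        · rw [if_pos htag]
          have htag' : PySem.Chars.startswith ((cs[p]'hp) :: cs.drop (p + 1)) ("[CITATION_".toList) = true := by
            rw [← hdrop]; exact htag
          by_cases hmem : ']' ∈ cs.drop p
          · -- a closed tag: jump past its ']'
            have htlt : ((cs.drop p).takeWhile (fun d => d ≠ ']')).length < (cs.drop p).length :=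
              pv_tw_lt (cs.drop p) ']' hmem
            have hfind : PySem.Chars.find (cs.drop p) [']'] =
                (((cs.drop p).takeWhile (fun d => d ≠ ']')).length : Int) := by
              rw [pv_find_singleton (cs.drop p) ']', if_pos hmem]
            have he : PySem.Chars.findFrom cs [']'] ((p : Nat) : Int) =
                (p : Int) + (((cs.drop p).takeWhile (fun d => d ≠ ']')).length : Int) := by
              rw [PySem.Chars.findFrom_natCast cs [']'] p (le_of_lt hp), hfind, if_neg (by omega)]
            rw [he, if_pos (by omega : ((p : Int) + (((cs.drop p).takeWhile (fun d => d ≠ ']')).length : Int) ≠ -1))]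
            have hstep : (p : Int) + (((cs.drop p).takeWhile (fun d => d ≠ ']')).length : Int) + 1 =
                (((p + ((cs.drop p).takeWhile (fun d => d ≠ ']')).length + 1 : Nat) : Int)) := by
              push_cast; ring
            rw [hstep, pv_goA_eq cs fuel _ (by simp only [List.length_drop] at htlt; omega)]
            rw [hdrop, pv_regex_cons, if_neg hwsP, if_pos htag', ← hdrop, if_pos htlt]
            rw [List.drop_drop]
            simp only [← Nat.add_assoc]
            push_cast; ring
          · -- no closing ']': the loop breaks, the tag alternative fails
            have hfind : PySem.Chars.find (cs.drop p) [']'] = -1 := by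
              rw [pv_find_singleton (cs.drop p) ']', if_neg hmem]
            have he : PySem.Chars.findFrom cs [']'] ((p : Nat) : Int) = -1 := by
              rw [PySem.Chars.findFrom_natCast cs [']'] p (le_of_lt hp), hfind, if_pos rfl]
            rw [he, if_neg (by simp)]
            have hall : (cs.drop p).takeWhile (fun d => d ≠ ']') = cs.drop p :=
              List.takeWhile_eq_self_iff.mpr (by
                intro a ha
                simp only [decide_eq_true_eq]
                exact fun heq => hmem (heq ▸ ha))
            rw [hdrop, pv_regex_cons, if_neg hwsP, if_pos htag', ← hdrop, hall,
              if_neg (lt_irrefl _)]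
            simp
        · rw [if_neg htag]
          rw [hdrop, pv_regex_cons, if_neg hwsP, if_neg (by rw [← hdrop]; exact htag)]
          simp

-- ===== VERDICT (by name: the statement is the Claim_ definition above) =====
theorem skip_ws_and_tags_right_py_spec : Claim_equal_skip_ws_and_tags_right_py := by
  intro text pos _ hpre
  unfold Spec_skip_ws_and_tags_right_py
  unfold Pre_skip_ws_and_tags_right_py at hpre
  obtain ⟨p, rfl⟩ : ∃ p : Nat, pos = (p : Int) := ⟨pos.toNat, (Int.toNat_of_nonneg hpre).symm⟩
  unfold skip_ws_and_tags_right_py skip_ws_and_tags_right_py_alt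
  rw [pv_goA_eq text.toList _ p (by omega)]
  by_cases hge : ((p : Int) ≥ (text.toList.length : Int))
  · rw [if_pos hge]
    rw [List.drop_eq_nil_of_le (by exact_mod_cast hge)]
    simp [pvRegexLen, pvRegexGo]
  · rw [if_neg hge]
    have hlt : p < text.toList.length := by omega
    simp only [Int.toNat_natCast]
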